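-- pv_equiv track=rewrite | github.com/dsmyronchuk/Hand_Over | Huawei_processing.py | command_sort
-- ===== SOURCE A (Python) =====
-- def command_sort(original_dct, lst_command):
--     new_dct = {}
--     for k in sorted(original_dct):              # создаю отсортированый словарь {ключ:пустой список}
--         new_dct[k] = []
--
--         for ls in lst_command:                  # прохожусь по каждой команде из списка
--             for v in original_dct[k]:           # прохожусь по старому словарю в новом порядке
--                 if ls in v[0]:                  # если команда из списка есть у данного ключа словаря
--                     new_dct[k].append(v)        # добавляю в новый словарь
--
--     return new_dct
-- ===== SOURCE B (Python) =====
-- def command_sort(original_dct, lst_command):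
--     # Value-major: one pass over each key's values filling one bucket per command
--     # (each matching bucket gets the value appended, the head v[0] fetched once per
--     # value), buckets concatenated in command order; the result is a dict
--     # comprehension over the sorted keys (no dict mutation, no per-command rescan).
--     def pick(vals):
--         if not lst_command:
--             return []
--         pairs = [(c, []) for c in lst_command]
--         for v in vals:
--             v0 = v[0]
--             for c, b in pairs:
--                 if c in v0:
--                     b.append(v)
--         merged = []
--         for _, b in pairs:
--             merged += b
--         return merged
--     return {k: pick(original_dct[k]) for k in sorted(original_dct)}
-- ===== Notes on version B (the rewrite author's own statement) =====
-- stated objective: alternative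
-- what changed: B replaces A's command-major triple loop with dict mutation by a dict comprehension over the sorted keys whose value is computed value-major: a single pass over the key's value list fills one bucket per command, and the buckets are concatenated in command order.
import Mathlib
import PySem

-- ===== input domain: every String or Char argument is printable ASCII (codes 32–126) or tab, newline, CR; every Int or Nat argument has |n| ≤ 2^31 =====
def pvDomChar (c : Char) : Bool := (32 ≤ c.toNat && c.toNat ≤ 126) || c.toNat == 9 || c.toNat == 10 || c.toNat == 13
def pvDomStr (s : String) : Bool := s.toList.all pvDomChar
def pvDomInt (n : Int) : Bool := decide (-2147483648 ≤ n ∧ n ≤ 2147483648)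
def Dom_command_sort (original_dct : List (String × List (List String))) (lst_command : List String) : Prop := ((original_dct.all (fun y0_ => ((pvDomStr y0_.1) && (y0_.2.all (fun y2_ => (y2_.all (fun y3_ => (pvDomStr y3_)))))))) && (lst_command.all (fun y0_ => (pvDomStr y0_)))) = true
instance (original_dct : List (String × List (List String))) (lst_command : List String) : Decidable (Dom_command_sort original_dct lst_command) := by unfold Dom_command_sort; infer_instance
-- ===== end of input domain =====

-- B is an ALTERNATIVE algorithm (dict comprehension over sorted keys; value-major bucket fill per key) with the same cost; equal return values proved on Pre_.

-- ===== PORT A =====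
def command_sort (original_dct : List (String × List (List String))) (lst_command : List String) : List (String × List (List String)) :=
  let d := PySem.Dict.ofList original_dct
  ((PySem.List.sorted d.keys (fun k => k)).foldl (fun nd k =>
      lst_command.foldl (fun nd2 ls =>
        (d.getD k []).foldl (fun nd3 v =>
          -- v[0]: IndexError on an empty v is excluded by Pre_ (the getD "" branch is never taken inside Pre_)
          if PySem.Str.isIn ls ((PySem.List.pyGet? v 0).getD "") then nd3.modify k [] (fun u => u ++ [v]) else nd3) nd2)
        (nd.insert k ([] : List (List String)))) PySem.Dict.empty).items

-- ===== PORT B =====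
-- pick(vals): value-major fill of one (command, bucket) pair per command (head v[0]
-- fetched once per value), then the buckets merged in command order.
def pvPick (lst_command : List String) (vals : List (List String)) : List (List String) :=
  match lst_command with
  | [] => []
  | _ =>
    let pairs := vals.foldl (fun ps v =>
        -- v0 = v[0]: IndexError on an empty v is excluded by Pre_ (the getD "" branch is never taken inside Pre_)
        let v0 := (PySem.List.pyGet? v 0).getD ""
        ps.map (fun cb => if PySem.Str.isIn cb.1 v0 then (cb.1, cb.2 ++ [v]) else cb))
      (lst_command.map (fun c => (c, [])))
    pairs.foldl (fun merged cb => merged ++ cb.2) []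

def command_sort_alt (original_dct : List (String × List (List String))) (lst_command : List String) : List (String × List (List String)) :=
  (PySem.List.sorted (PySem.Dict.ofList original_dct).keys (fun k => k)).map
    (fun k => (k, pvPick lst_command ((PySem.Dict.ofList original_dct).getD k [])))

-- ===== PRECONDITION & SPEC =====
-- Pre_ excludes exactly the inputs where the Python A raises IndexError at v[0]:
-- a non-empty command list together with an empty inner list among the dict's values (B raises there too).
def Pre_command_sort (original_dct : List (String × List (List String))) (lst_command : List String) : Prop :=
  lst_command = [] ∨ ∀ val ∈ (PySem.Dict.ofList original_dct).values, ∀ v ∈ val, v ≠ []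
instance (original_dct : List (String × List (List String))) (lst_command : List String) : Decidable (Pre_command_sort original_dct lst_command) := by unfold Pre_command_sort; infer_instance
def pvWitness_command_sort : (List (String × List (List String))) × List String :=
  ([("b", [["show ip", "x"]]), ("a", [["display", "y"], ["quit"]])], ["ip", "play"])

def Spec_command_sort (original_dct : List (String × List (List String))) (lst_command : List String) (out : List (String × List (List String))) : Prop := out = command_sort_alt original_dct lst_command
instance (original_dct : List (String × List (List String))) (lst_command : List String) (out : List (String × List (List String))) : Decidable (Spec_command_sort original_dct lst_command out) := by unfold Spec_command_sort; infer_instance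

-- ===== CLAIM (what is proved, stated in full; the proofs are below) =====
def Claim_equal_command_sort : Prop := ∀ (original_dct : List (String × List (List String))) (lst_command : List String), Dom_command_sort original_dct lst_command → Pre_command_sort original_dct lst_command → Spec_command_sort original_dct lst_command (command_sort original_dct lst_command)

-- ===== LEMMAS AND PROOFS =====

-- A's innermost loop: conditional append-via-modify at a fixed key k.
lemma pv_A_inner {κ α : Type} [BEq κ] [LawfulBEq κ] (p : α → Bool) (vals : List α)
    (nd : PySem.Dict κ (List α)) (k : κ) (acc : List α) :
    vals.foldl (fun nd3 v => if p v then nd3.modify k [] (fun u => u ++ [v]) else nd3) (nd.insert k acc)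
      = nd.insert k (acc ++ vals.filter p) := by
  induction vals generalizing acc with
  | nil => simp
  | cons v vs ih =>
    by_cases h : p v
    · have hm : (nd.insert k acc).modify k [] (fun u => u ++ [v]) = nd.insert k (acc ++ [v]) := by
        simp [PySem.Dict.modify, PySem.Dict.getD_insert_self, PySem.Dict.insert_insert_self]
      simp [h, hm, ih]
    · simp [h, ih]

-- A's middle loop over the commands.
lemma pv_A_mid {κ α : Type} [BEq κ] [LawfulBEq κ] (p : String → α → Bool) (cmds : List String)
    (vals : List α) (nd : PySem.Dict κ (List α)) (k : κ) (acc : List α) :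
    cmds.foldl (fun nd2 ls =>
        vals.foldl (fun nd3 v => if p ls v then nd3.modify k [] (fun u => u ++ [v]) else nd3) nd2)
      (nd.insert k acc)
      = nd.insert k (acc ++ cmds.flatMap (fun ls => vals.filter (p ls))) := by
  induction cmds generalizing acc with
  | nil => simp
  | cons c cs ih => simp [pv_A_inner, ih]

-- B's pair-list fill: empty pair list stays empty.
lemma pv_B_fill_nil {α : Type} (q : String → α → Bool) (vals : List α) :
    vals.foldl (fun ps v => ps.map (fun cb => if q cb.1 v then (cb.1, cb.2 ++ [v]) else cb))
      ([] : List (String × List α)) = [] := by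
  induction vals with
  | nil => rfl
  | cons v vs ih => simpa using ih

-- B's pair-list fill splits componentwise.
lemma pv_B_fill_cons {α : Type} (q : String → α → Bool) (c : String) (b : List α)
    (rest : List (String × List α)) (vals : List α) :
    vals.foldl (fun ps v => ps.map (fun cb => if q cb.1 v then (cb.1, cb.2 ++ [v]) else cb)) ((c, b) :: rest)
      = (c, vals.foldl (fun acc v => if q c v then acc ++ [v] else acc) b)
        :: (vals.foldl (fun ps v => ps.map (fun cb => if q cb.1 v then (cb.1, cb.2 ++ [v]) else cb)) rest) := by
  induction vals generalizing b rest with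
  | nil => rfl
  | cons v vs ih =>
    by_cases h : q c v <;> simp [h, ih]

-- B's pair-list fill, started from one empty bucket per command, is a per-command filter.
lemma pv_B_fill {α : Type} (q : String → α → Bool) (cs : List String) (vals : List α) :
    vals.foldl (fun ps v => ps.map (fun cb => if q cb.1 v then (cb.1, cb.2 ++ [v]) else cb))
      (cs.map (fun c => (c, [])))
      = cs.map (fun c => (c, vals.filter (q c))) := by
  induction cs with
  | nil => simpa using pv_B_fill_nil q vals
  | cons c cs ih =>
    simp only [List.map_cons, pv_B_fill_cons, ih, PySem.List.foldl_append_if_eq_filter]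
    simp

-- pick = command-major flatMap of filters.
lemma pv_pick_eq (cmds : List String) (vals : List (List String)) :
    pvPick cmds vals
      = cmds.flatMap (fun ls => vals.filter (fun v => PySem.Str.isIn ls ((PySem.List.pyGet? v 0).getD ""))) := by
  cases cmds with
  | nil => rfl
  | cons c cs =>
    unfold pvPick
    rw [pv_B_fill (q := fun c v => PySem.Str.isIn c ((PySem.List.pyGet? v 0).getD ""))]
    rw [PySem.List.foldl_append_eq_flatMap]
    simp [List.flatMap_def, Function.comp_def]

-- ===== VERDICT (by name: the statement is the Claim_ definition above) =====
theorem command_sort_spec : Claim_equal_command_sort := by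
  intro original_dct lst_command _ _
  unfold Spec_command_sort command_sort command_sort_alt
  simp only []
  set d := PySem.Dict.ofList original_dct with hd
  have hnd : (PySem.List.sorted d.keys (fun k => k) false).Nodup :=
    (PySem.List.sorted_perm d.keys (fun k => k) false).nodup_iff.mpr (PySem.Dict.nodup_keys_ofList original_dct)
  calc ((PySem.List.sorted d.keys (fun k => k)).foldl (fun nd k =>
          lst_command.foldl (fun nd2 ls =>
            (d.getD k []).foldl (fun nd3 v =>
              if PySem.Str.isIn ls ((PySem.List.pyGet? v 0).getD "") then nd3.modify k [] (fun u => u ++ [v]) else nd3) nd2)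
            (nd.insert k ([] : List (List String)))) PySem.Dict.empty).items
      = ((PySem.List.sorted d.keys (fun k => k)).foldl (fun nd k =>
          nd.insert k (pvPick lst_command (d.getD k []))) PySem.Dict.empty).items := by
        refine congrArg PySem.Dict.items ?_
        apply PySem.List.foldl_congr_mem
        intro nd k _
        rw [pv_A_mid (p := fun ls v => PySem.Str.isIn ls ((PySem.List.pyGet? v 0).getD ""))]
        rw [pv_pick_eq]
        simp
    _ = (PySem.List.sorted d.keys (fun k => k)).map (fun k => (k, pvPick lst_command (d.getD k []))) := by
        have h := PySem.Dict.items_foldl_insert_fresh (PySem.List.sorted d.keys (fun k => k) false)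
            (fun x => x) (fun a => pvPick lst_command (d.getD a []))
            PySem.Dict.empty (fun a _ => PySem.Dict.contains_empty a) (by simpa using hnd)
        simpa using h
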